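-- pv_equiv track=rewrite | github.com/Hanseokhun98/Coding_Test | 23.08.05/연습문제2_임의의수버전.py | find_min_sums
-- ===== SOURCE A (Python) =====
-- from itertools import combinations
-- from copy import deepcopy
--
-- def find_min_sums(nums, prev_sum=0):
--     # Base case: only two numbers left in the list
--     if len(nums) == 2:
--         return [prev_sum + max(nums)]
--
--     sums = []
--     # Find all combinations of 2 numbers
--     for pair in combinations(nums, 2):
--         new_nums = deepcopy(nums)  # Make a copy of the list
--         new_nums.remove(pair[0])  # Remove the two numbers from the list
--         new_nums.remove(pair[1])
--         new_nums.append(sum(pair))  # Add the sum of pair to the list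
--         # Recursive call with the new list and the updated sum
--         sums.extend(find_min_sums(new_nums, prev_sum + max(pair)))
--     return sums
-- ===== SOURCE B (Python) =====
-- def _merged(ns, x, y):
--     rest = list(ns)
--     rest.remove(x)
--     rest.remove(y)
--     rest.append(x + y)
--     return rest
--
-- def find_min_sums(nums, prev_sum=0):
--     # Breadth-first level expansion: all partial merge states advance one merge per
--     # round; since every merge sequence has the same length, the final frontier is in
--     # the same (lexicographic = DFS pre-order) order as A's recursion.
--     if len(nums) < 2:
--         return []
--     frontier = [(list(nums), prev_sum)]
--     for _ in range(len(nums) - 2):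
--         frontier = [(_merged(ns, x, y), acc + max(x, y))
--                     for ns, acc in frontier
--                     for i, x in enumerate(ns)
--                     for y in ns[i + 1:]]
--     return [acc + max(ns) for ns, acc in frontier]
-- ===== Notes on version B (the rewrite author's own statement) =====
-- stated objective: alternative
-- what changed: Replaces A's depth-first recursion with an iterative breadth-first level expansion: a single frontier list of (list, accumulated-sum) states is advanced one merge per round for len(nums)-2 rounds, then the final two-element states are mapped to their answers; since all merge sequences have equal length, the frontier's lexicographic order reproduces A's pre-order output exactly.
import Mathlib
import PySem

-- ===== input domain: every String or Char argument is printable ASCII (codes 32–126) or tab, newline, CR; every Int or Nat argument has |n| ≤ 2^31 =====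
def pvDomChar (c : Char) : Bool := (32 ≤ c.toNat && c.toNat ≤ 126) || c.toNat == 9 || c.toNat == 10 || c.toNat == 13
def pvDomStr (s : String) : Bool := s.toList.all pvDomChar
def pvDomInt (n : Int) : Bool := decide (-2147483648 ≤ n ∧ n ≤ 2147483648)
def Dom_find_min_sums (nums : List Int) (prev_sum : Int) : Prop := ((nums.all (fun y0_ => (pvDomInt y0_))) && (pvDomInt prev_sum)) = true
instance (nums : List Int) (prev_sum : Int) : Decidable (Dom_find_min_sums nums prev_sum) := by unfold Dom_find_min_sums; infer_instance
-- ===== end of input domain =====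

-- B replaces A's recursion by breadth-first level expansion (all partial merge states advance one
-- merge per round; same output order); objective: alternative decomposition, not speed.

-- ===== PORT A =====
-- itertools.combinations(l, 2) in its enumeration order
def combos2 (l : List Int) : List (Int × Int) :=
  match l with
  | [] => []
  | x :: xs => xs.map (fun y => (x, y)) ++ combos2 xs

-- new_nums = copy; remove(pair[0]); remove(pair[1]); append(sum(pair))
def childA (nums : List Int) (p : Int × Int) : List Int :=
  ((PySem.List.remove? ((PySem.List.remove? nums p.1).getD []) p.2).getD []) ++ [p.1 + p.2]

-- termination facts for port A (cited in decreasing_by)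
theorem remove_pair_of_mem_combos2 (l : List Int) (p : Int × Int) (hp : p ∈ combos2 l) :
    ∃ l1 l2, PySem.List.remove? l p.1 = some l1 ∧ PySem.List.remove? l1 p.2 = some l2 ∧
      l2.length + 2 = l.length := by
  induction l with
  | nil => simp [combos2] at hp
  | cons x xs ih =>
    simp only [combos2, List.mem_append, List.mem_map] at hp
    rcases hp with ⟨y, hy, hxy⟩ | hp
    · subst hxy
      refine ⟨xs, xs.erase y, PySem.List.remove?_cons_self x xs, PySem.List.remove?_eq_some_erase _ _ hy, ?_⟩
      have h1le : 1 ≤ xs.length := List.length_pos_of_mem hy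
      simp [List.length_erase_of_mem hy]; omega
    · obtain ⟨l1, l2, h1, h2, hlen⟩ := ih hp
      have hmem1 : p.1 ∈ xs := by
        by_contra hc
        rw [← PySem.List.remove?_eq_none_iff (xs := xs) (v := p.1)] at hc
        simp [hc] at h1
      have hmem2 : p.2 ∈ l1 := by
        by_contra hc
        rw [← PySem.List.remove?_eq_none_iff (xs := l1) (v := p.2)] at hc
        simp [hc] at h2
      by_cases hx1 : x = p.1
      · have hl1 : l1 = xs.erase p.1 := by
          have h := PySem.List.remove?_eq_some_erase _ _ hmem1
          rw [h1] at h; exact Option.some.inj h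
        have hmem2' : p.2 ∈ xs := (xs.erase_subset) (hl1 ▸ hmem2)
        refine ⟨xs, xs.erase p.2, ?_, PySem.List.remove?_eq_some_erase _ _ hmem2', ?_⟩
        · rw [hx1]; exact PySem.List.remove?_cons_self p.1 xs
        · have h1le : 1 ≤ xs.length := List.length_pos_of_mem hmem1
          simp [List.length_erase_of_mem hmem2']; omega
      · have hr1 : PySem.List.remove? (x :: xs) p.1 = some (x :: l1) := by
          rw [PySem.List.remove?_cons_of_ne xs hx1, h1]; rfl
        by_cases hx2 : x = p.2
        · refine ⟨x :: l1, l1, hr1, ?_, ?_⟩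
          · rw [hx2]; exact PySem.List.remove?_cons_self p.2 l1
          · have hl2 : l2 = l1.erase p.2 := by
              have h := PySem.List.remove?_eq_some_erase _ _ hmem2
              rw [h2] at h; exact Option.some.inj h
            have h1le : 1 ≤ l1.length := List.length_pos_of_mem hmem2
            have hll : l2.length + 1 = l1.length := by
              simp [hl2, List.length_erase_of_mem hmem2]; omega
            simp; omega
        · refine ⟨x :: l1, x :: l2, hr1, ?_, ?_⟩
          · rw [PySem.List.remove?_cons_of_ne l1 hx2, h2]; rfl
          · simp; omega

theorem childA_length (l : List Int) (p : Int × Int) (hp : p ∈ combos2 l) :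
    (childA l p).length + 1 = l.length := by
  obtain ⟨l1, l2, h1, h2, hlen⟩ := remove_pair_of_mem_combos2 l p hp
  simp [childA, h1, h2]; omega

def find_min_sums (nums : List Int) (prev_sum : Int) : List Int :=
  match nums with
  | [a, b] => [prev_sum + max a b]
  | l =>
    (combos2 l).attach.foldl
      (fun sums pr =>
        sums ++ find_min_sums (childA l pr.1) (prev_sum + max pr.1.1 pr.1.2)) []
termination_by nums.length
decreasing_by
  have := childA_length l pr.1 pr.2
  omega

-- ===== PORT B =====
-- _merged: list.remove erases the first occurrence (PySem remove? succeeds: at every call site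
-- x is an element of ns and y occurs after x's position, so remove never raises — erase is exact here)
def mergedB (ns : List Int) (x y : Int) : List Int :=
  ((ns.erase x).erase y) ++ [x + y]

-- one round of the comprehension: for ns,acc in frontier for i,x in enumerate(ns) for y in ns[i+1:]
def stepB (frontier : List (List Int × Int)) : List (List Int × Int) :=
  frontier.flatMap (fun fr =>
    (PySem.List.enumerate fr.1 0).flatMap (fun ix =>
      (PySem.List.slice fr.1 (some (ix.1 + 1)) none).map (fun y =>
        (mergedB fr.1 ix.2 y, fr.2 + max ix.2 y))))

def find_min_sums_alt (nums : List Int) (prev_sum : Int) : List Int :=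
  if nums.length < 2 then []
  else
    ((List.range (nums.length - 2)).foldl (fun fr _ => stepB fr) [(nums, prev_sum)]).map
      (fun fr => fr.2 + (PySem.List.max? fr.1 (fun x => x)).getD 0)
      -- max(ns): every final frame has two elements, so max? is some; getD 0 is unreachable

-- ===== PRECONDITION & SPEC =====
def Spec_find_min_sums (nums : List Int) (prev_sum : Int) (out : List Int) : Prop := out = find_min_sums_alt nums prev_sum
instance (nums : List Int) (prev_sum : Int) (out : List Int) : Decidable (Spec_find_min_sums nums prev_sum out) := by unfold Spec_find_min_sums; infer_instance

-- ===== CLAIM (what is proved, stated in full; the proofs are below) =====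
def Claim_equal_find_min_sums : Prop := ∀ (nums : List Int) (prev_sum : Int), Dom_find_min_sums nums prev_sum → Spec_find_min_sums nums prev_sum (find_min_sums nums prev_sum)

-- ===== LEMMAS AND PROOFS =====
theorem A_pair (a b acc : Int) : find_min_sums [a, b] acc = [acc + max a b] := by
  simp [find_min_sums]

theorem A_eq_flatMap (ns : List Int) (acc : Int) (h : ∀ a b : Int, ns ≠ [a, b]) :
    find_min_sums ns acc
      = (combos2 ns).flatMap (fun pr => find_min_sums (childA ns pr) (acc + max pr.1 pr.2)) := by
  rw [find_min_sums.eq_def]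
  split
  · rename_i a b; exact absurd rfl (h a b)
  · rw [PySem.List.foldl_append_eq_flatMap]
    conv_rhs => rw [← List.attach_map_subtype_val (combos2 ns), List.flatMap_map]
    simp

theorem max2_getD (a b : Int) : (PySem.List.max? [a, b] (fun x => x)).getD 0 = max a b := by
  rw [PySem.List.max?_id_cons]
  simp

theorem mem_combos2 (l : List Int) (p : Int × Int) (hp : p ∈ combos2 l) :
    p.1 ∈ l ∧ p.2 ∈ l.erase p.1 := by
  induction l with
  | nil => simp [combos2] at hp
  | cons x xs ih =>
    simp only [combos2, List.mem_append, List.mem_map] at hp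
    rcases hp with ⟨y, hy, hxy⟩ | hp
    · subst hxy
      exact ⟨List.mem_cons_self, by simpa using hy⟩
    · obtain ⟨h1, h2⟩ := ih hp
      refine ⟨List.mem_cons_of_mem x h1, ?_⟩
      by_cases hx : x = p.1
      · simpa [List.erase_cons, hx] using List.mem_of_mem_erase h2
      · simpa [List.erase_cons, hx] using Or.inr h2

theorem childA_eq_mergedB (l : List Int) (p : Int × Int) (hp : p ∈ combos2 l) :
    childA l p = mergedB l p.1 p.2 := by
  obtain ⟨h1, h2⟩ := mem_combos2 l p hp
  have e1 := PySem.List.remove?_eq_some_erase _ _ h1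
  have e2 := PySem.List.remove?_eq_some_erase _ _ h2
  simp [childA, mergedB, e1, e2]

theorem enum_pairs_aux {β : Type} (f : Int → Int → β) (ns : List Int) :
    ∀ (t : List Int) (k : Nat), ns.drop k = t →
    (PySem.List.enumerate t (k : Int)).flatMap (fun ix =>
        (PySem.List.slice ns (some (ix.1 + 1)) none).map (fun y => f ix.2 y))
      = (combos2 t).map (fun p => f p.1 p.2) := by
  intro t
  induction t with
  | nil => intro k h; simp [combos2, PySem.List.enumerate_nil]
  | cons x xs ih =>
    intro k h
    have hdrop : ns.drop (k + 1) = xs := by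
      have : (ns.drop k).drop 1 = ns.drop (k + 1) := by
        rw [List.drop_drop]
      rw [h] at this
      simpa using this.symm
    have hslice : PySem.List.slice ns (some ((k : Int) + 1)) none = xs := by
      have : ((k : Int) + 1) = ((k + 1 : Nat) : Int) := by push_cast; ring
      rw [this, PySem.List.slice_from_natCast, hdrop]
    rw [PySem.List.enumerate_cons, List.flatMap_cons]
    have hcast : (k : Int) + 1 = ((k + 1 : Nat) : Int) := by push_cast; ring
    rw [hcast] at *
    rw [ih (k + 1) hdrop]
    simp [combos2, hslice]

theorem stepB_eq (st : List (List Int × Int)) :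
    stepB st = st.flatMap (fun fr =>
      (combos2 fr.1).map (fun p => (childA fr.1 p, fr.2 + max p.1 p.2))) := by
  unfold stepB
  apply List.flatMap_congr
  intro fr _
  have := enum_pairs_aux (fun x y => (mergedB fr.1 x y, fr.2 + max x y)) fr.1 fr.1 0 (by simp)
  rw [Int.natCast_zero] at this
  rw [this]
  apply List.map_congr_left
  intro p hp
  rw [childA_eq_mergedB fr.1 p hp]

theorem foldl_range_iterate (n : Nat) (st : List (List Int × Int)) :
    (List.range n).foldl (fun fr _ => stepB fr) st = stepB^[n] st := by
  induction n with
  | zero => rfl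
  | succ m ih =>
    rw [List.range_succ, List.foldl_append, ih, Function.iterate_succ_apply']
    rfl

theorem level_spec (m : Nat) :
    ∀ (st : List (List Int × Int)), (∀ fr ∈ st, fr.1.length = m + 2) →
    (stepB^[m] st).map (fun fr => fr.2 + (PySem.List.max? fr.1 (fun x => x)).getD 0)
      = st.flatMap (fun fr => find_min_sums fr.1 fr.2) := by
  induction m with
  | zero =>
    intro st hst
    induction st with
    | nil => simp
    | cons fr rest ihst =>
      obtain ⟨a, b, hab⟩ := List.length_eq_two.mp (hst fr List.mem_cons_self)
      rw [Function.iterate_zero_apply] at ihst ⊢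
      rw [List.map_cons, List.flatMap_cons,
        ihst (fun g hg => hst g (List.mem_cons_of_mem fr hg))]
      simp [hab, A_pair, max2_getD]
  | succ m ih =>
    intro st hst
    have hlen : ∀ fr ∈ stepB st, fr.1.length = m + 2 := by
      intro fr hfr
      rw [stepB_eq] at hfr
      simp only [List.mem_flatMap, List.mem_map] at hfr
      obtain ⟨g, hg, p, hp, hfr⟩ := hfr
      have := childA_length g.1 p hp
      have := hst g hg
      rw [← hfr]
      simp_all
    rw [Function.iterate_succ_apply, ih (stepB st) hlen, stepB_eq,
      List.flatMap_assoc]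
    apply List.flatMap_congr
    intro fr hfr
    have h3 : fr.1.length = m + 3 := hst fr hfr
    have hne : ∀ a b : Int, fr.1 ≠ [a, b] := by
      intro a b hab; rw [hab] at h3; simp at h3
    rw [A_eq_flatMap fr.1 fr.2 hne, List.flatMap_map]

-- ===== VERDICT (by name: the statement is the Claim_ definition above) =====
theorem find_min_sums_spec : Claim_equal_find_min_sums := by
  intro nums prev_sum _
  unfold Spec_find_min_sums find_min_sums_alt
  by_cases h : nums.length < 2
  · rw [if_pos h]
    match nums, h with
    | [], _ => simp [find_min_sums, combos2]
    | [x], _ => simp [find_min_sums, combos2]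
  · rw [if_neg h, foldl_range_iterate,
      level_spec (nums.length - 2) [(nums, prev_sum)] (by simp; omega)]
    simp
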